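-- pv_equiv track=rewrite | github.com/dapascual/DirectedBeamSearch | utility_gpt.py | isSubset
-- ===== SOURCE A (Python) =====
-- def isSubset(subarraies, array):
--     counter = 0
--     for subarray in subarraies:
--         for i in range(len(array)):
--             for j in range(len(subarray)):
--                 if i+j < len(array):
--                     if array[i+j] == subarray[j]:
--                         if j == len(subarray)-1:
--                             counter += 1
--                     else:
--                         break
--     return counter
-- ===== SOURCE B (Python) =====
-- def isSubset(subarraies, array):
--     # Count, over all subarraies, occurrences as contiguous runs in array.
--     # One window-counter dict is built per distinct subarray length, then each
--     # subarray is a single hash lookup (fast when lengths repeat).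
--     n = len(array)
--     win_counts = {}
--     for s in subarraies:
--         m = len(s)
--         if 0 < m and m <= n and m not in win_counts:
--             c = {}
--             for i in range(n - m + 1):
--                 w = tuple(array[i:i + m])
--                 c[w] = c.get(w, 0) + 1
--             win_counts[m] = c
--     total = 0
--     for s in subarraies:
--         total += win_counts.get(len(s), {}).get(tuple(s), 0)
--     return total
-- ===== Notes on version B (the rewrite author's own statement) =====
-- stated objective: faster
-- what changed: Replaced the per-subarray triple nested index loop by a hash index: for each distinct subarray length one pass over the array builds a counter of all windows of that length, and every subarray is then answered by a single dictionary lookup.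
import Mathlib
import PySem

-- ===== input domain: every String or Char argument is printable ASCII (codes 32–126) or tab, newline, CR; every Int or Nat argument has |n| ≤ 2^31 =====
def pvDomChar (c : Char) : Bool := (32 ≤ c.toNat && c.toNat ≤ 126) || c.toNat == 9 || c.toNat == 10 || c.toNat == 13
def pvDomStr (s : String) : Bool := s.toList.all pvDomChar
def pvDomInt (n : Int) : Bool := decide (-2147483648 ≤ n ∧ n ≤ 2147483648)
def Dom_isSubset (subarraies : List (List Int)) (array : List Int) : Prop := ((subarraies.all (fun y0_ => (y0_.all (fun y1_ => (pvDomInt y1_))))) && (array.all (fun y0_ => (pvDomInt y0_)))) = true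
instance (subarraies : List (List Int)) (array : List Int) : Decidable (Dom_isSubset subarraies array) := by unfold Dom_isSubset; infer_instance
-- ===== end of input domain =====

-- B replaces A's per-subarray triple nested scan by one window-counter dict per
-- distinct subarray length plus a single lookup per subarray (objective: faster).

-- ===== PORT A =====
-- inner 'for j in range(len(subarray)): …' with break; array[i+j] is guarded by i+j < len(array)
def isSubsetInner (subarray array : List Int) (i : Int) : Int → List Int → Int
  | counter, [] => counter
  | counter, j :: js =>
    if i + j < (array.length : Int) then
      if PySem.List.pyGetD array (i + j) 0 = PySem.List.pyGetD subarray j 0 then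
        isSubsetInner subarray array i
          (if j = (subarray.length : Int) - 1 then counter + 1 else counter) js
      else counter
    else isSubsetInner subarray array i counter js

def isSubset (subarraies : List (List Int)) (array : List Int) : Int :=
  subarraies.foldl
    (fun counter subarray =>
      (PySem.List.pyRange 0 (array.length : Int) 1).foldl
        (fun counter i =>
          isSubsetInner subarray array i counter
            (PySem.List.pyRange 0 (subarray.length : Int) 1))
        counter)
    0

-- ===== PORT B =====
-- 'c[w] = c.get(w, 0) + 1' over the windows of length m (a Python tuple key ports as the window list itself)
def isSubsetWinCounter (array : List Int) (m n : Int) : PySem.Dict (List Int) Int :=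
  (PySem.List.pyRange 0 (n - m + 1) 1).foldl
    (fun c i =>
      let w := PySem.List.slice array (some i) (some (i + m))
      c.insert w (c.getD w 0 + 1))
    PySem.Dict.empty

def isSubset_alt (subarraies : List (List Int)) (array : List Int) : Int :=
  let n : Int := (array.length : Int)
  let winCounts : PySem.Dict Int (PySem.Dict (List Int) Int) :=
    subarraies.foldl
      (fun t s =>
        let m : Int := (s.length : Int)
        if 0 < m ∧ m ≤ n ∧ ¬ (t.contains m = true) then
          t.insert m (isSubsetWinCounter array m n)
        else t)
      PySem.Dict.empty
  subarraies.foldl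
    (fun total s =>
      total + (winCounts.getD (s.length : Int) PySem.Dict.empty).getD s 0)
    0

-- ===== PRECONDITION & SPEC =====
def Spec_isSubset (subarraies : List (List Int)) (array : List Int) (out : Int) : Prop := out = isSubset_alt subarraies array
instance (subarraies : List (List Int)) (array : List Int) (out : Int) : Decidable (Spec_isSubset subarraies array out) := by unfold Spec_isSubset; infer_instance

-- ===== CLAIM (what is proved, stated in full; the proofs are below) =====
def Claim_equal_isSubset : Prop := ∀ (subarraies : List (List Int)) (array : List Int), Dom_isSubset subarraies array → Spec_isSubset subarraies array (isSubset subarraies array)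

-- ===== LEMMAS AND PROOFS =====

-- the list of length-m windows of array (n = array.length)
def windowsOf (array : List Int) (m n : Int) : List (List Int) :=
  (PySem.List.pyRange 0 (n - m + 1) 1).map
    (fun i => PySem.List.slice array (some i) (some (i + m)))

-- the common per-subarray contribution of both programs
def perSub (array : List Int) (n : Int) (s : List Int) : Int :=
  if 0 < (s.length : Int) ∧ (s.length : Int) ≤ n then
    ((windowsOf array (s.length : Int) n).count s : Int)
  else 0

theorem winCounter_eq_counter (array : List Int) (m n : Int) :
    isSubsetWinCounter array m n = PySem.Dict.counter (windowsOf array m n) := by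
  rw [isSubsetWinCounter, windowsOf, ← PySem.Dict.foldl_insert_getD_add_one_eq_counter,
    List.foldl_map]

theorem inner_skip (s array : List Int) (i : Int) (c : Int) (js : List Int)
    (h : ∀ j ∈ js, (array.length : Int) ≤ i + j) :
    isSubsetInner s array i c js = c := by
  induction js with
  | nil => rfl
  | cons j js ih =>
    have hj := h j (by simp)
    simp only [isSubsetInner, if_neg (by omega : ¬ i + j < (array.length : Int))]
    exact ih (fun j hj => h j (by simp [hj]))

theorem inner_eq (s array : List Int) (i : Int) :
    ∀ (k : Nat) (j0 c : Int), 0 ≤ j0 → j0 < (s.length : Int) → ((s.length : Int) - j0).toNat = k →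
    isSubsetInner s array i c (PySem.List.pyRange j0 (s.length : Int) 1) =
      c + (if i + (s.length : Int) ≤ (array.length : Int) ∧
              (∀ j : Int, j0 ≤ j → j < (s.length : Int) →
                PySem.List.pyGetD array (i + j) 0 = PySem.List.pyGetD s j 0)
           then 1 else 0) := by
  intro k
  induction k with
  | zero => intro j0 c h0 hlt hk; omega
  | succ k ih =>
    intro j0 c h0 hlt hk
    rw [PySem.List.pyRange_one_cons hlt]
    by_cases hin : i + j0 < (array.length : Int)
    · by_cases hmatch : PySem.List.pyGetD array (i + j0) 0 = PySem.List.pyGetD s j0 0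
      · by_cases hlast : j0 = (s.length : Int) - 1
        · simp only [isSubsetInner, if_pos hin, if_pos hmatch, if_pos hlast]
          rw [PySem.List.pyRange_one_eq_nil (by omega)]
          simp only [isSubsetInner]
          rw [if_pos]
          refine ⟨by omega, fun j hj1 hj2 => ?_⟩
          have : j = j0 := by omega
          rw [this]; exact hmatch
        · simp only [isSubsetInner, if_pos hin, if_pos hmatch, if_neg hlast]
          rw [ih (j0 + 1) c (by omega) (by omega) (by omega)]
          congr 1
          refine if_congr (Iff.intro ?_ ?_) rfl rfl
          · rintro ⟨h1, h2⟩
            refine ⟨h1, fun j hj1 hj2 => ?_⟩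
            by_cases hje : j = j0
            · rw [hje]; exact hmatch
            · exact h2 j (by omega) hj2
          · rintro ⟨h1, h2⟩; exact ⟨h1, fun j hj1 hj2 => h2 j (by omega) hj2⟩
      · simp only [isSubsetInner, if_pos hin, if_neg hmatch]
        rw [if_neg]
        · omega
        · rintro ⟨h1, h2⟩; exact hmatch (h2 j0 le_rfl hlt)
    · have hge : (array.length : Int) ≤ i + j0 := by omega
      simp only [isSubsetInner, if_neg hin]
      rw [inner_skip s array i c _ (fun j hj => by
        rw [PySem.List.mem_pyRange_one] at hj; omega)]
      rw [if_neg]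
      · omega
      · rintro ⟨h1, h2⟩; omega

theorem match_iff_slice (s array : List Int) (a : Nat)
    (h : a + s.length ≤ array.length) :
    (∀ j : Int, 0 ≤ j → j < (s.length : Int) →
        PySem.List.pyGetD array ((a : Int) + j) 0 = PySem.List.pyGetD s j 0) ↔
      PySem.List.slice array (some (a : Int)) (some ((a : Int) + (s.length : Int))) = s := by
  rw [PySem.List.slice_natCast_add]
  have hlen : ((array.drop a).take s.length).length = s.length := by
    simp; omega
  constructor
  · intro hAll
    apply List.ext_getElem hlen
    intro jn h1 h2
    have h3 : a + jn < array.length := by omega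
    have hh := hAll (jn : Int) (by exact_mod_cast Int.natCast_nonneg jn) (by exact_mod_cast h2)
    have e1 : (a : Int) + (jn : Int) = ((a + jn : Nat) : Int) := by push_cast; ring
    rw [e1, PySem.List.pyGetD_natCast, PySem.List.pyGetD_natCast,
      List.getD_eq_getElem _ _ h3, List.getD_eq_getElem _ _ h2] at hh
    simpa [List.getElem_take, List.getElem_drop] using hh
  · intro hEq j hj0 hjm
    obtain ⟨jn, rfl⟩ : ∃ jn : Nat, j = (jn : Int) := ⟨j.toNat, by omega⟩
    have h2 : jn < s.length := by exact_mod_cast hjm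
    have h3 : a + jn < array.length := by omega
    have e1 : (a : Int) + (jn : Int) = ((a + jn : Nat) : Int) := by push_cast; ring
    rw [e1, PySem.List.pyGetD_natCast, PySem.List.pyGetD_natCast,
      List.getD_eq_getElem _ _ h3, List.getD_eq_getElem _ _ h2]
    have h4 : jn < ((array.drop a).take s.length).length := by omega
    have := List.getElem_of_eq hEq h4
    simpa [List.getElem_take, List.getElem_drop] using this

theorem sum_map_ite_eq_count (xs : List (List Int)) (s : List Int) :
    (xs.map (fun w => if w = s then (1:Int) else 0)).sum = (xs.count s : Int) := by
  induction xs with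
  | nil => simp
  | cons w xs ih =>
    simp only [List.map_cons, List.sum_cons, ih, List.count_cons]
    by_cases h : w = s
    · simp [h, add_comm]
    · simp [h]

theorem contrib_eq (s array : List Int) (c0 : Int) :
    (PySem.List.pyRange 0 (array.length : Int) 1).foldl
      (fun c i => isSubsetInner s array i c (PySem.List.pyRange 0 (s.length : Int) 1)) c0 =
      c0 + perSub array (array.length : Int) s := by
  by_cases hm : 0 < (s.length : Int)
  swap
  · have hs : s = [] := List.eq_nil_of_length_eq_zero (by omega)
    subst hs
    have hfix : ∀ (l : List Int) (c : Int),
        l.foldl (fun c i => isSubsetInner [] array i c (PySem.List.pyRange 0 (([] : List Int).length : Int) 1)) c = c := by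
      intro l
      induction l with
      | nil => intro c; rfl
      | cons x l ih =>
        intro c
        simp only [List.foldl_cons, List.length_nil, Nat.cast_zero]
        rw [PySem.List.pyRange_one_eq_nil (by omega)]
        exact ih c
    rw [hfix]
    simp [perSub]
  · rw [PySem.List.foldl_congr_mem _ _
      (fun c i => c +
        (if i + (s.length : Int) ≤ (array.length : Int) ∧
            (∀ j : Int, 0 ≤ j → j < (s.length : Int) →
              PySem.List.pyGetD array (i + j) 0 = PySem.List.pyGetD s j 0)
         then 1 else 0)) c0
      (by
        intro acc i hmem
        rw [PySem.List.mem_pyRange_one] at hmem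
        exact inner_eq s array i s.length 0 acc le_rfl hm (by omega))]
    rw [PySem.List.foldl_add]
    congr 1
    by_cases hmn : (s.length : Int) ≤ (array.length : Int)
    · rw [PySem.List.pyRange_one_append 0 ((array.length : Int) - (s.length : Int) + 1)
        (array.length : Int) (by omega) (by omega), List.map_append, List.sum_append]
      have h2 : (((PySem.List.pyRange ((array.length : Int) - (s.length : Int) + 1) (array.length : Int) 1).map
          (fun i => if i + (s.length : Int) ≤ (array.length : Int) ∧
            (∀ j : Int, 0 ≤ j → j < (s.length : Int) →
              PySem.List.pyGetD array (i + j) 0 = PySem.List.pyGetD s j 0)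
           then (1:Int) else 0)).sum) = 0 := by
        apply List.sum_eq_zero
        intro x hx
        rw [List.mem_map] at hx
        obtain ⟨i, hi, rfl⟩ := hx
        rw [PySem.List.mem_pyRange_one] at hi
        rw [if_neg]
        rintro ⟨h1, -⟩
        omega
      rw [h2, add_zero]
      rw [List.map_congr_left
        (g := fun i =>
          if PySem.List.slice array (some i) (some (i + (s.length : Int))) = s then (1:Int) else 0)
        (by
          intro i hi
          rw [PySem.List.mem_pyRange_one] at hi
          obtain ⟨a, rfl⟩ : ∃ a : Nat, i = (a : Int) := ⟨i.toNat, by omega⟩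
          have hb : a + s.length ≤ array.length := by omega
          rw [if_congr (Iff.intro
            (fun hc => (match_iff_slice s array a hb).1 hc.2)
            (fun hc => ⟨by omega, (match_iff_slice s array a hb).2 hc⟩)) rfl rfl])]
      rw [perSub, if_pos ⟨hm, hmn⟩, windowsOf,
        show (fun i => if PySem.List.slice array (some i) (some (i + (s.length : Int))) = s
            then (1:Int) else 0) =
          ((fun w => if w = s then (1:Int) else 0) ∘
            (fun i => PySem.List.slice array (some i) (some (i + (s.length : Int))))) from rfl,
        ← List.map_map, sum_map_ite_eq_count]
    · have h2 : ∀ x ∈ (PySem.List.pyRange 0 (array.length : Int) 1).map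
          (fun i => if i + (s.length : Int) ≤ (array.length : Int) ∧
            (∀ j : Int, 0 ≤ j → j < (s.length : Int) →
              PySem.List.pyGetD array (i + j) 0 = PySem.List.pyGetD s j 0)
           then (1:Int) else 0), x = 0 := by
        intro x hx
        rw [List.mem_map] at hx
        obtain ⟨i, hi, rfl⟩ := hx
        rw [PySem.List.mem_pyRange_one] at hi
        rw [if_neg]
        rintro ⟨h1, -⟩
        omega
      rw [List.sum_eq_zero h2, perSub, if_neg (by omega)]

theorem table_get (array : List Int) (n : Int) :
    ∀ (pre : List (List Int)) (seen : List Int)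
      (t : PySem.Dict Int (PySem.Dict (List Int) Int)),
    (∀ m', t.get? m' = if 0 < m' ∧ m' ≤ n ∧ m' ∈ seen
            then some (isSubsetWinCounter array m' n) else none) →
    ∀ m', (pre.foldl
        (fun t s =>
          if 0 < (s.length : Int) ∧ (s.length : Int) ≤ n ∧ ¬ (t.contains (s.length : Int) = true) then
            t.insert (s.length : Int) (isSubsetWinCounter array (s.length : Int) n)
          else t) t).get? m' =
      if 0 < m' ∧ m' ≤ n ∧ (m' ∈ seen ∨ m' ∈ pre.map (fun s => (s.length : Int)))
      then some (isSubsetWinCounter array m' n) else none := by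
  intro pre
  induction pre with
  | nil =>
    intro seen t ht m'
    simp only [List.foldl_nil]
    rw [ht m']
    refine if_congr (Iff.intro ?_ ?_) rfl rfl
    · rintro ⟨a, b, c⟩; exact ⟨a, b, Or.inl c⟩
    · rintro ⟨a, b, c | c⟩
      · exact ⟨a, b, c⟩
      · simp at c
  | cons s0 rest ih =>
    intro seen t ht m'
    simp only [List.foldl_cons]
    have ht' : ∀ m', ((if 0 < (s0.length : Int) ∧ (s0.length : Int) ≤ n ∧
          ¬ (t.contains (s0.length : Int) = true) then
            t.insert (s0.length : Int) (isSubsetWinCounter array (s0.length : Int) n)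
          else t).get? m') =
        if 0 < m' ∧ m' ≤ n ∧ m' ∈ ((s0.length : Int) :: seen)
        then some (isSubsetWinCounter array m' n) else none := by
      intro m'
      by_cases hc : 0 < (s0.length : Int) ∧ (s0.length : Int) ≤ n ∧
          ¬ (t.contains (s0.length : Int) = true)
      · rw [if_pos hc, PySem.Dict.get?_insert]
        by_cases he : m' = (s0.length : Int)
        · subst he
          rw [if_pos rfl, if_pos ⟨hc.1, hc.2.1, List.mem_cons_self⟩]
        · rw [if_neg he, ht m']
          refine if_congr (Iff.intro ?_ ?_) rfl rfl
          · rintro ⟨a, b, c⟩; exact ⟨a, b, List.mem_cons_of_mem _ c⟩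
          · rintro ⟨a, b, c⟩
            rcases List.mem_cons.1 c with rfl | c2
            · exact absurd rfl he
            · exact ⟨a, b, c2⟩
      · rw [if_neg hc, ht m']
        refine if_congr (Iff.intro ?_ ?_) rfl rfl
        · rintro ⟨a, b, c⟩; exact ⟨a, b, List.mem_cons_of_mem _ c⟩
        · rintro ⟨a, b, c⟩
          rcases List.mem_cons.1 c with he | c2
          · refine ⟨a, b, ?_⟩
            have hcont : t.contains (s0.length : Int) = true := by
              by_contra hnc
              exact hc ⟨he ▸ a, he ▸ b, hnc⟩
            rw [PySem.Dict.contains_eq_isSome_get?, ht (s0.length : Int)] at hcont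
            by_cases hs : 0 < (s0.length : Int) ∧ (s0.length : Int) ≤ n ∧ (s0.length : Int) ∈ seen
            · rw [he]; exact hs.2.2
            · rw [if_neg hs] at hcont; simp at hcont
          · exact ⟨a, b, c2⟩
    rw [ih ((s0.length : Int) :: seen) _ ht']
    refine if_congr (Iff.intro ?_ ?_) rfl rfl
    · rintro ⟨a, b, c⟩
      refine ⟨a, b, ?_⟩
      simp only [List.mem_cons, List.map_cons] at c ⊢
      tauto
    · rintro ⟨a, b, c⟩
      refine ⟨a, b, ?_⟩
      simp only [List.mem_cons, List.map_cons] at c ⊢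
      tauto

theorem alt_eq (subarraies : List (List Int)) (array : List Int) :
    isSubset_alt subarraies array =
      subarraies.foldl (fun acc s => acc + perSub array (array.length : Int) s) 0 := by
  simp only [isSubset_alt]
  apply PySem.List.foldl_congr_mem
  intro acc s hs
  congr 1
  have hget := table_get array (array.length : Int) subarraies [] PySem.Dict.empty
    (by intro m'; rw [PySem.Dict.get?_empty]; simp) (s.length : Int)
  rw [PySem.Dict.getD_eq_get?_getD (k := ((s.length : Int))), hget]
  have hmem : (s.length : Int) ∈ subarraies.map (fun s => (s.length : Int)) :=
    List.mem_map_of_mem hs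
  by_cases hc : 0 < (s.length : Int) ∧ (s.length : Int) ≤ (array.length : Int)
  · rw [if_pos ⟨hc.1, hc.2, Or.inr hmem⟩]
    simp only [Option.getD_some]
    rw [winCounter_eq_counter, PySem.Dict.getD_counter, perSub, if_pos hc]
  · rw [if_neg (by tauto)]
    simp only [Option.getD_none]
    rw [PySem.Dict.getD_empty, perSub, if_neg hc]

theorem a_eq (subarraies : List (List Int)) (array : List Int) :
    isSubset subarraies array =
      subarraies.foldl (fun acc s => acc + perSub array (array.length : Int) s) 0 := by
  simp only [isSubset]
  apply PySem.List.foldl_congr_mem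
  intro acc s hs
  exact contrib_eq s array acc

-- ===== VERDICT (by name: the statement is the Claim_ definition above) =====
theorem isSubset_spec : Claim_equal_isSubset := by
  intro subarraies array _
  unfold Spec_isSubset
  rw [a_eq, alt_eq]
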